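-- pv_equiv track=rewrite | github.com/KNS-Ashura/Katarenga_v2 | Online/NetworkGameLogic.py | _check_congress_victory
-- ===== SOURCE A (Python) =====
-- from collections import deque
--
-- def _check_congress_victory(board):
--     """
--     Congress victory condition:
--     All player's pawns must be connected in one group
--     """
--     grid_dim = len(board)
--
--     for player in [1, 2]:
--         # Find all positions of current player
--         positions = [(i, j) for i in range(grid_dim) for j in range(grid_dim)
--                     if board[i][j] % 10 == player]
--
--         if not positions:
--             continue
--
--         # Check if all pawns are connected using BFS
--         visited = set([positions[0]])
--         queue = deque([positions[0]])
--
--         while queue: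
--             x, y = queue.popleft()
--             for dx, dy in [(-1,0), (1,0), (0,-1), (0,1)]:
--                 nx, ny = x + dx, y + dy
--                 if (0 <= nx < grid_dim and 0 <= ny < grid_dim and
--                     (nx, ny) not in visited and board[nx][ny] % 10 == player):
--                     visited.add((nx, ny))
--                     queue.append((nx, ny))
--
--         # If all pawns are connected, player wins
--         if len(visited) == len(positions):
--             return player
--
--     return None
-- ===== SOURCE B (Python) =====
-- def _check_congress_victory(board):
--     """
--     Congress victory condition:
--     All player's pawns must be connected in one group
--     """
--     n = len(board)
--
--     for player in (1, 2):
--         pawns = [(i, j) for i in range(n) for j in range(n)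
--                  if board[i][j] % 10 == player]
--         if not pawns:
--             continue
--
--         # Round-based closure: repeatedly absorb every pawn adjacent to the
--         # reached set; len(pawns) rounds always suffice to reach the fixpoint.
--         reached = {pawns[0]}
--         for _ in range(len(pawns)):
--             reached |= {p for p in pawns
--                         if (p[0] - 1, p[1]) in reached or (p[0] + 1, p[1]) in reached
--                         or (p[0], p[1] - 1) in reached or (p[0], p[1] + 1) in reached}
--
--         if len(reached) == len(pawns):
--             return player
--
--     return None
-- ===== Notes on version B (the rewrite author's own statement) =====
-- stated objective: alternative
-- what changed: Replaces A's deque-based BFS flood fill from the first pawn by a round-based closure: len(pawns) rounds, each absorbing every pawn whose neighbour is already in the reached set, then a size comparison; no queue/frontier bookkeeping and no per-cell bounds checks.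
import Mathlib
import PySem

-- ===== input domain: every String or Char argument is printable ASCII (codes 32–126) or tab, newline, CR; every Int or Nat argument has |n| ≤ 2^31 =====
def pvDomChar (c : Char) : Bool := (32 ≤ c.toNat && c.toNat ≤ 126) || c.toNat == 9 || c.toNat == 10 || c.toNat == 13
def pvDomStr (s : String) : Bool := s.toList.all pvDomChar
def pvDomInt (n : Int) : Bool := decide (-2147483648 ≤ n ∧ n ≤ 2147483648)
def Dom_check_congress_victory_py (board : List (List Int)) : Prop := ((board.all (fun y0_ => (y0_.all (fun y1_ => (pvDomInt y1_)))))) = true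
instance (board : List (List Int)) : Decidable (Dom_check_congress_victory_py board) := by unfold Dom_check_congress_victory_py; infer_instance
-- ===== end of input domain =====

-- B replaces A's queue-based BFS by a round-based closure: starting from the first pawn,
-- it repeatedly absorbs every pawn adjacent to the reached set (len(pawns) rounds reach
-- the fixpoint); objective: alternative (same connectivity result, no queue/frontier).

-- ===== PORT A =====

-- board[i][j] (indices here are always nonnegative; on ragged boards, where Python A
-- raises IndexError, the out-of-range access yields the pyGetD default)
def pvCellA (board : List (List Int)) (i j : Int) : Int :=
  PySem.List.pyGetD (PySem.List.pyGetD board i []) j 0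

-- positions = [(i, j) for i in range(grid_dim) for j in range(grid_dim) if board[i][j] % 10 == player]
def pvPositions (board : List (List Int)) (player : Int) : List (Int × Int) :=
  (List.range board.length).flatMap (fun i : Nat =>
    ((List.range board.length).filter
        (fun j : Nat => PySem.Int.mod (pvCellA board (i : Int) (j : Int)) 10 == player)).map
      (fun j : Nat => ((i : Int), (j : Int))))

-- (helpers for the BFS termination measure and its specification)
def pvShift (v d : Int × Int) : Int × Int := (v.1 + d.1, v.2 + d.2)

def pvIntRange (n : Nat) : List Int := List.map (fun i : Nat => (i : Int)) (List.range n)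

def pvGrid (n : Nat) : List (Int × Int) := List.product (pvIntRange n) (pvIntRange n)

def pvOkB (board : List (List Int)) (n : Nat) (player : Int) (x : Int × Int) : Bool :=
  decide (0 ≤ x.1) && decide (x.1 < (n : Int)) && decide (0 ≤ x.2) && decide (x.2 < (n : Int)) &&
    (PySem.Int.mod (pvCellA board x.1 x.2) 10 == player)

-- the inner `for dx, dy in [...]` body: bounds test, `not in visited`, board test;
-- visited.add / queue.append after a successful `not in visited` test both append
def pvExpandGo (board : List (List Int)) (n : Nat) (player : Int) (c : Int × Int)
    (ds : List (Int × Int)) (st : List (Int × Int) × List (Int × Int)) :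
    List (Int × Int) × List (Int × Int) :=
  ds.foldl (fun st d =>
    if decide (0 ≤ c.1 + d.1) && decide (c.1 + d.1 < (n : Int)) && decide (0 ≤ c.2 + d.2) &&
        decide (c.2 + d.2 < (n : Int)) && !(PySem.Set.contains st.1 (c.1 + d.1, c.2 + d.2)) &&
        (PySem.Int.mod (pvCellA board (c.1 + d.1) (c.2 + d.2)) 10 == player)
    then (st.1 ++ [(c.1 + d.1, c.2 + d.2)], st.2 ++ [(c.1 + d.1, c.2 + d.2)])
    else st) st

def pvExpand (board : List (List Int)) (n : Nat) (player : Int) (c : Int × Int)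
    (st : List (Int × Int) × List (Int × Int)) : List (Int × Int) × List (Int × Int) :=
  pvExpandGo board n player c [(-1, 0), (1, 0), (0, -1), (0, 1)] st

lemma pv_mem_grid (n : Nat) (x : Int × Int) :
    x ∈ pvGrid n ↔ 0 ≤ x.1 ∧ x.1 < (n : Int) ∧ 0 ≤ x.2 ∧ x.2 < (n : Int) := by
  obtain ⟨a, b⟩ := x
  unfold pvGrid
  rw [show ((a, b) ∈ List.product (pvIntRange n) (pvIntRange n)) ↔ (a ∈ pvIntRange n ∧ b ∈ pvIntRange n) from List.pair_mem_product]
  simp only [pvIntRange, List.mem_map, List.mem_range]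
  constructor
  · rintro ⟨⟨i, hi, rfl⟩, ⟨j, hj, rfl⟩⟩
    refine ⟨by positivity, by exact_mod_cast hi, by positivity, by exact_mod_cast hj⟩
  · rintro ⟨h1, h2, h3, h4⟩
    exact ⟨⟨a.toNat, by omega, Int.toNat_of_nonneg h1⟩, ⟨b.toNat, by omega, Int.toNat_of_nonneg h3⟩⟩

lemma pvExpandGo_spec (board : List (List Int)) (n : Nat) (player : Int) (c : Int × Int) :
    ∀ (ds : List (Int × Int)) (visited q0 : List (Int × Int)),
    ∃ new : List (Int × Int),
      pvExpandGo board n player c ds (visited, q0) = (visited ++ new, q0 ++ new) ∧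
      new.Nodup ∧
      (∀ x ∈ new, x ∉ visited ∧ pvOkB board n player x = true ∧ ∃ d ∈ ds, x = pvShift c d) ∧
      (∀ d ∈ ds, pvOkB board n player (pvShift c d) = true → pvShift c d ∈ visited ++ new) := by
  intro ds
  induction ds with
  | nil => intro visited q0; exact ⟨[], by simp [pvExpandGo], by simp, by simp, by simp⟩
  | cons d ds ih =>
    intro visited q0
    have hstep : pvExpandGo board n player c (d :: ds) (visited, q0)
        = pvExpandGo board n player c ds
            (if decide (0 ≤ c.1 + d.1) && decide (c.1 + d.1 < (n : Int)) && decide (0 ≤ c.2 + d.2) &&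
                decide (c.2 + d.2 < (n : Int)) && !(PySem.Set.contains visited (c.1 + d.1, c.2 + d.2)) &&
                (PySem.Int.mod (pvCellA board (c.1 + d.1) (c.2 + d.2)) 10 == player)
             then (visited ++ [(c.1 + d.1, c.2 + d.2)], q0 ++ [(c.1 + d.1, c.2 + d.2)])
             else (visited, q0)) := rfl
    by_cases hok : pvOkB board n player (pvShift c d) = true
    · by_cases hmem : pvShift c d ∈ visited
      · -- condition false because of membership
        have hcond : (decide (0 ≤ c.1 + d.1) && decide (c.1 + d.1 < (n : Int)) && decide (0 ≤ c.2 + d.2) &&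
            decide (c.2 + d.2 < (n : Int)) && !(PySem.Set.contains visited (c.1 + d.1, c.2 + d.2)) &&
            (PySem.Int.mod (pvCellA board (c.1 + d.1) (c.2 + d.2)) 10 == player)) = false := by
          simp [pvShift] at hmem
          simp [PySem.Set.contains_iff, hmem]
        obtain ⟨new, heq, hnd, hprops, hcover⟩ := ih visited q0
        refine ⟨new, by rw [hstep, hcond]; simpa using heq, hnd, ?_, ?_⟩
        · intro x hx; obtain ⟨h1, h2, d', hd', h3⟩ := hprops x hx
          exact ⟨h1, h2, d', List.mem_cons_of_mem _ hd', h3⟩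
        · intro d' hd' hok'
          rcases List.mem_cons.mp hd' with rfl | hd'
          · exact List.mem_append_left _ hmem
          · exact hcover d' hd' hok'
      · -- condition true
        have hcond : (decide (0 ≤ c.1 + d.1) && decide (c.1 + d.1 < (n : Int)) && decide (0 ≤ c.2 + d.2) &&
            decide (c.2 + d.2 < (n : Int)) && !(PySem.Set.contains visited (c.1 + d.1, c.2 + d.2)) &&
            (PySem.Int.mod (pvCellA board (c.1 + d.1) (c.2 + d.2)) 10 == player)) = true := by
          simp [pvOkB, pvShift] at hok
          simp [pvShift] at hmem
          simp [PySem.Set.contains_iff, hmem, hok]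
        obtain ⟨new, heq, hnd, hprops, hcover⟩ := ih (visited ++ [pvShift c d]) (q0 ++ [pvShift c d])
        refine ⟨pvShift c d :: new, ?_, ?_, ?_, ?_⟩
        · rw [hstep, hcond]
          simpa [pvShift, List.append_assoc] using heq
        · refine List.nodup_cons.mpr ⟨?_, hnd⟩
          intro hc
          exact (hprops _ hc).1 (List.mem_append_right _ (by simp))
        · intro x hx
          rcases List.mem_cons.mp hx with rfl | hx
          · exact ⟨hmem, hok, d, by simp⟩
          · obtain ⟨h1, h2, d', hd', h3⟩ := hprops x hx
            exact ⟨fun hv => h1 (List.mem_append_left _ hv), h2, d', List.mem_cons_of_mem _ hd', h3⟩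
        · intro d' hd' hok'
          rcases List.mem_cons.mp hd' with rfl | hd'
          · simp
          · have := hcover d' hd' hok'
            simp only [List.append_assoc, List.mem_append, List.mem_cons, List.mem_singleton] at this ⊢
            tauto
    · -- pvOkB false: condition false (bounds or board test fails)
      have hcond : (decide (0 ≤ c.1 + d.1) && decide (c.1 + d.1 < (n : Int)) && decide (0 ≤ c.2 + d.2) &&
          decide (c.2 + d.2 < (n : Int)) && !(PySem.Set.contains visited (c.1 + d.1, c.2 + d.2)) &&
          (PySem.Int.mod (pvCellA board (c.1 + d.1) (c.2 + d.2)) 10 == player)) = false := by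
        simp [pvOkB, pvShift] at hok
        simp only [Bool.and_eq_false_iff, Bool.and_eq_true, Bool.not_eq_true', decide_eq_false_iff_not, decide_eq_true_eq, beq_eq_false_iff_ne, ne_eq, not_and, not_forall]
        by_cases h1 : (0 : Int) ≤ c.1 + d.1
        all_goals by_cases h2 : c.1 + d.1 < (n : Int)
        all_goals by_cases h3 : (0 : Int) ≤ c.2 + d.2
        all_goals by_cases h4 : c.2 + d.2 < (n : Int)
        all_goals simp [h1, h2, h3, h4]
        all_goals try exact Or.inr (hok h1 h2 h3 h4)
      obtain ⟨new, heq, hnd, hprops, hcover⟩ := ih visited q0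
      refine ⟨new, by rw [hstep, hcond]; simpa using heq, hnd, ?_, ?_⟩
      · intro x hx; obtain ⟨h1, h2, d', hd', h3⟩ := hprops x hx
        exact ⟨h1, h2, d', List.mem_cons_of_mem _ hd', h3⟩
      · intro d' hd' hok'
        rcases List.mem_cons.mp hd' with rfl | hd'
        · exact absurd hok' hok
        · exact hcover d' hd' hok'

lemma pvExpand_le (board : List (List Int)) (n : Nat) (player : Int) (c : Int × Int)
    (visited : List (Int × Int)) :
    ((pvGrid n).filter (fun q => decide (q ∉ (pvExpand board n player c (visited, [])).1))).length
      + (pvExpand board n player c (visited, [])).2.length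
    ≤ ((pvGrid n).filter (fun q => decide (q ∉ visited))).length := by
  obtain ⟨new, heq, hnd, hprops, -⟩ :=
    pvExpandGo_spec board n player c [(-1, 0), (1, 0), (0, -1), (0, 1)] visited []
  rw [show pvExpand board n player c (visited, []) = (visited ++ new, new) by
    rw [pvExpand, heq]; simp]
  dsimp only
  have hL : (pvGrid n).filter (fun q => decide (q ∉ visited ++ new))
      = ((pvGrid n).filter (fun q => decide (q ∉ visited))).filter (fun q => decide (q ∉ new)) := by
    rw [List.filter_filter]
    apply List.filter_congr
    intro q _
    simp [List.mem_append]
    rw [Bool.and_comm]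
  have hsub : ∀ x ∈ new, x ∈ ((pvGrid n).filter (fun q => decide (q ∉ visited))).filter
      (fun q => decide (q ∈ new)) := by
    intro x hx
    obtain ⟨h1, h2, -⟩ := hprops x hx
    have hg : x ∈ pvGrid n := by
      rw [pv_mem_grid]
      simp [pvOkB] at h2
      tauto
    simp only [List.mem_filter, decide_eq_true_eq]
    exact ⟨⟨hg, h1⟩, hx⟩
  have h2 : new.length ≤ (((pvGrid n).filter (fun q => decide (q ∉ visited))).filter
      (fun q => decide (q ∈ new))).length :=
    (hnd.subperm hsub).length_le
  have h3 := List.length_eq_length_filter_add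
    (l := (pvGrid n).filter (fun q => decide (q ∉ visited))) (fun q => decide (q ∈ new))
  have h4 : (((pvGrid n).filter (fun q => decide (q ∉ visited))).filter
        (fun q => !decide (q ∈ new)))
      = (((pvGrid n).filter (fun q => decide (q ∉ visited))).filter (fun q => decide (q ∉ new))) := by
    apply List.filter_congr; intro q _; simp
  rw [hL]
  rw [h4] at h3
  omega

-- the `while queue:` BFS loop over the state (visited, queue)
def pvBfs (board : List (List Int)) (n : Nat) (player : Int)
    (visited queue : List (Int × Int)) : List (Int × Int) :=
  match queue with
  | [] => visited
  | c :: rest =>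
      pvBfs board n player (pvExpand board n player c (visited, [])).1
        (rest ++ (pvExpand board n player c (visited, [])).2)
termination_by ((pvGrid n).filter (fun q => decide (q ∉ visited))).length + queue.length
decreasing_by
  have h := pvExpand_le board n player c visited
  simp only [List.length_append, List.length_cons]
  omega

-- one iteration of `for player in [1, 2]:`
def pvTryA (board : List (List Int)) (player : Int) : Option Int :=
  match pvPositions board player with
  | [] => none
  | p0 :: _ =>
      if (pvBfs board board.length player [p0] [p0]).length = (pvPositions board player).length
      then some player else none

def check_congress_victory_py (board : List (List Int)) : Option Int :=
  match pvTryA board 1 with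
  | some p => some p
  | none => pvTryA board 2

-- ===== PORT B =====
-- pawns: the same indexed comprehension as A's positions (shared helper pvPositions)

-- p has a neighbour in reached
def pvNbrTest (r : PySem.Set (Int × Int)) (p : Int × Int) : Bool :=
  PySem.Set.contains r (p.1 - 1, p.2) || PySem.Set.contains r (p.1 + 1, p.2) ||
    PySem.Set.contains r (p.1, p.2 - 1) || PySem.Set.contains r (p.1, p.2 + 1)

-- reached |= {p for p in pawns if ...}
def pvGrow (pawns : List (Int × Int)) (r : PySem.Set (Int × Int)) : PySem.Set (Int × Int) :=
  PySem.Set.union r (pawns.filter (pvNbrTest r))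

-- one iteration of `for player in (1, 2):`
def pvTryB (board : List (List Int)) (player : Int) : Option Int :=
  match pvPositions board player with
  | [] => none
  | p0 :: _ =>
      let pawns := pvPositions board player
      let reached := (List.range pawns.length).foldl (fun r _ => pvGrow pawns r)
        (PySem.Set.ofList [p0])
      if PySem.Set.len reached = (pawns.length : Int) then some player else none

def check_congress_victory_py_alt (board : List (List Int)) : Option Int :=
  match pvTryB board 1 with
  | some p => some p
  | none => pvTryB board 2

-- ===== PRECONDITION & SPEC =====
-- Pre_ excludes exactly the ragged boards on which some row is shorter than len(board):
-- there A's comprehension board[i][j] raises IndexError, so A returns no value.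
def Pre_check_congress_victory_py (board : List (List Int)) : Prop :=
  ∀ row ∈ board, board.length ≤ row.length
instance (board : List (List Int)) : Decidable (Pre_check_congress_victory_py board) := by
  unfold Pre_check_congress_victory_py; infer_instance

def pvWitness_check_congress_victory_py : List (List Int) := [[1, 0], [0, 11]]

def Spec_check_congress_victory_py (board : List (List Int)) (out : Option Int) : Prop := out = check_congress_victory_py_alt board
instance (board : List (List Int)) (out : Option Int) : Decidable (Spec_check_congress_victory_py board out) := by unfold Spec_check_congress_victory_py; infer_instance

-- ===== CLAIM (what is proved, stated in full; the proofs are below) =====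
def Claim_equal_check_congress_victory_py : Prop := ∀ (board : List (List Int)), Dom_check_congress_victory_py board → Pre_check_congress_victory_py board → Spec_check_congress_victory_py board (check_congress_victory_py board)

-- ===== LEMMAS AND PROOFS =====

-- the neighbour offsets [(-1,0), (1,0), (0,-1), (0,1)] as a named list (for the proofs)
def pvDeltas : List (Int × Int) := [(-1, 0), (1, 0), (0, -1), (0, 1)]

-- the step relation of the player's connectivity graph: move to an adjacent in-grid cell of the player
def pvStepRel (board : List (List Int)) (n : Nat) (player : Int) (a b : Int × Int) : Prop :=
  pvOkB board n player b = true ∧ ∃ d ∈ pvDeltas, b = pvShift a d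

def pvReach (board : List (List Int)) (n : Nat) (player : Int) (s x : Int × Int) : Prop :=
  Relation.ReflTransGen (pvStepRel board n player) s x

lemma pvBfs_spec (board : List (List Int)) (n : Nat) (player : Int) (s : Int × Int) :
    ∀ (visited queue : List (Int × Int)),
    visited.Nodup →
    (∀ c ∈ queue, c ∈ visited) →
    (∀ x ∈ visited, pvReach board n player s x) →
    (∀ v ∈ visited, v ∉ queue → ∀ d ∈ pvDeltas,
        pvOkB board n player (pvShift v d) = true → pvShift v d ∈ visited) →
    (pvBfs board n player visited queue).Nodup ∧
    (∀ x ∈ visited, x ∈ pvBfs board n player visited queue) ∧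
    (∀ x ∈ pvBfs board n player visited queue, pvReach board n player s x) ∧
    (∀ v ∈ pvBfs board n player visited queue, ∀ d ∈ pvDeltas,
        pvOkB board n player (pvShift v d) = true →
        pvShift v d ∈ pvBfs board n player visited queue) := by
  intro visited queue
  fun_induction pvBfs board n player visited queue with
  | case1 visited =>
    intro hnd hq hreach hclosed
    exact ⟨hnd, fun x hx => hx, hreach,
      fun v hv d hd hok => hclosed v hv (by simp) d hd hok⟩
  | case2 visited c rest ih =>
    intro hnd hq hreach hclosed
    obtain ⟨new, heq, hndnew, hprops, hcover⟩ :=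
      pvExpandGo_spec board n player c [(-1, 0), (1, 0), (0, -1), (0, 1)] visited []
    have hst1 : (pvExpand board n player c (visited, [])).1 = visited ++ new := by
      rw [pvExpand, heq]
    have hst2 : (pvExpand board n player c (visited, [])).2 = new := by
      rw [pvExpand, heq]; simp
    have hdisj : ∀ x ∈ new, x ∉ visited := fun x hx => (hprops x hx).1
    have H1 : (visited ++ new).Nodup := by
      rw [List.nodup_append]
      refine ⟨hnd, hndnew, ?_⟩
      intro a ha b hb
      exact fun hab => hdisj b hb (hab ▸ ha)
    have H2 : ∀ c' ∈ rest ++ new, c' ∈ visited ++ new := by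
      intro c' hc'
      rcases List.mem_append.mp hc' with h | h
      · exact List.mem_append_left _ (hq c' (List.mem_cons_of_mem _ h))
      · exact List.mem_append_right _ h
    have H3 : ∀ x ∈ visited ++ new, pvReach board n player s x := by
      intro x hx
      rcases List.mem_append.mp hx with h | h
      · exact hreach x h
      · obtain ⟨-, hokx, d, hd, hxeq⟩ := hprops x h
        exact Relation.ReflTransGen.tail (hreach c (hq c (List.mem_cons_self)))
          ⟨hokx, d, by simpa [pvDeltas] using hd, hxeq⟩
    have H4 : ∀ v ∈ visited ++ new, v ∉ rest ++ new → ∀ d ∈ pvDeltas,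
        pvOkB board n player (pvShift v d) = true → pvShift v d ∈ visited ++ new := by
      intro v hv hvq d hd hok
      rcases List.mem_append.mp hv with h | h
      · by_cases hvc : v = c
        · subst hvc
          exact hcover d (by simpa [pvDeltas] using hd) hok
        · have : v ∉ rest := fun hm => hvq (List.mem_append_left _ hm)
          exact List.mem_append_left _
            (hclosed v h (by simp [hvc, this]) d hd hok)
      · exact absurd (List.mem_append_right _ h) hvq
    rw [hst1, hst2] at ih
    have R := ih H1 H2 H3 H4
    rw [hst1, hst2]
    exact ⟨R.1, fun x hx => R.2.1 x (List.mem_append_left _ hx), R.2.2.1, R.2.2.2⟩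

lemma pvBfs_full (board : List (List Int)) (n : Nat) (player : Int) (s : Int × Int) :
    (pvBfs board n player [s] [s]).Nodup ∧
    (∀ x, x ∈ pvBfs board n player [s] [s] ↔ pvReach board n player s x) := by
  obtain ⟨h1, h2, h3, h4⟩ := pvBfs_spec board n player s [s] [s]
    (by simp) (by simp)
    (by intro x hx; rw [List.mem_singleton] at hx; subst hx; exact Relation.ReflTransGen.refl)
    (by simp)
  refine ⟨h1, fun x => ⟨h3 x, fun hr => ?_⟩⟩
  induction hr with
  | refl => exact h2 s (by simp)
  | tail hab hrel ih =>
    obtain ⟨hok, d, hd, hbeq⟩ := hrel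
    subst hbeq
    exact h4 _ ih d hd hok

lemma pv_positions_eq_filter (board : List (List Int)) (player : Int) :
    pvPositions board player
      = (pvGrid board.length).filter (pvOkB board board.length player) := by
  unfold pvPositions pvGrid pvIntRange
  rw [show List.product (List.map (fun i : Nat => (i : Int)) (List.range board.length))
        (List.map (fun i : Nat => (i : Int)) (List.range board.length))
      = (List.map (fun i : Nat => (i : Int)) (List.range board.length)).flatMap
          (fun a => (List.map (fun i : Nat => (i : Int)) (List.range board.length)).map
            (Prod.mk a)) from rfl]
  rw [List.filter_flatMap, List.flatMap_map]
  apply List.flatMap_congr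
  intro i hi
  rw [List.filter_map, List.filter_map]
  have hi' : i < board.length := List.mem_range.mp hi
  have hfil : List.filter ((pvOkB board board.length player ∘ Prod.mk ((i : Int))) ∘ fun k : Nat => ((k : Int)))
      (List.range board.length)
      = List.filter (fun j : Nat => PySem.Int.mod (pvCellA board (i : Int) (j : Int)) 10 == player)
        (List.range board.length) := by
    apply List.filter_congr
    intro j hj
    have hj' : j < board.length := List.mem_range.mp hj
    simp only [Function.comp, pvOkB]
    simp [hi', hj']
  rw [hfil, List.map_map]
  apply List.map_congr_left
  intro j hj
  rfl

lemma pv_mem_positions (board : List (List Int)) (player : Int) (x : Int × Int) :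
    x ∈ pvPositions board player ↔ pvOkB board board.length player x = true := by
  rw [pv_positions_eq_filter]
  simp only [List.mem_filter]
  constructor
  · exact fun h => h.2
  · intro h
    refine ⟨(pv_mem_grid _ _).mpr ?_, h⟩
    simp only [pvOkB, Bool.and_eq_true, decide_eq_true_eq] at h
    tauto

lemma pv_foldl_iterate {α : Type} (f : α → α) (r0 : α) (m : Nat) :
    (List.range m).foldl (fun r _ => f r) r0 = f^[m] r0 := by
  induction m with
  | zero => rfl
  | succ k ih => rw [List.range_succ, List.foldl_append, ih, List.foldl_cons, List.foldl_nil,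
      Function.iterate_succ_apply']

lemma pv_grow_append (pawns : List (Int × Int)) (r : PySem.Set (Int × Int)) :
    ∃ t, pvGrow pawns r = r ++ t := by
  rw [pvGrow, PySem.Set.union, PySem.Set.update_eq_append_filter]
  exact ⟨_, rfl⟩

lemma pv_mem_grow (pawns : List (Int × Int)) (r : PySem.Set (Int × Int)) (x : Int × Int) :
    x ∈ pvGrow pawns r ↔ x ∈ r ∨ (x ∈ pawns ∧ pvNbrTest r x = true) := by
  rw [pvGrow, PySem.Set.mem_union, List.mem_filter]

lemma pv_nbrTest_iff (r : PySem.Set (Int × Int)) (x : Int × Int) :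
    pvNbrTest r x = true ↔ ∃ d ∈ pvDeltas, pvShift x d ∈ r := by
  simp only [pvNbrTest, Bool.or_eq_true, PySem.Set.contains_iff]
  constructor
  · rintro (((h | h) | h) | h)
    · exact ⟨(-1, 0), by simp [pvDeltas], by
        rw [show pvShift x (-1, 0) = (x.1 - 1, x.2) by simp [pvShift]; ring]; exact h⟩
    · exact ⟨(1, 0), by simp [pvDeltas], by
        rw [show pvShift x (1, 0) = (x.1 + 1, x.2) by simp [pvShift]]; exact h⟩
    · exact ⟨(0, -1), by simp [pvDeltas], by
        rw [show pvShift x (0, -1) = (x.1, x.2 - 1) by simp [pvShift]; ring]; exact h⟩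
    · exact ⟨(0, 1), by simp [pvDeltas], by
        rw [show pvShift x (0, 1) = (x.1, x.2 + 1) by simp [pvShift]]; exact h⟩
  · rintro ⟨d, hd, hm⟩
    simp only [pvDeltas, List.mem_cons, List.mem_singleton] at hd
    rcases hd with rfl | rfl | rfl | rfl | h
    · exact Or.inl (Or.inl (Or.inl (by
        rw [show (x.1 - 1, x.2) = pvShift x (-1, 0) by simp [pvShift]; ring]; exact hm)))
    · exact Or.inl (Or.inl (Or.inr (by
        rw [show (x.1 + 1, x.2) = pvShift x (1, 0) by simp [pvShift]]; exact hm)))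
    · exact Or.inl (Or.inr (by
        rw [show (x.1, x.2 - 1) = pvShift x (0, -1) by simp [pvShift]; ring]; exact hm))
    · exact Or.inr (by
        rw [show (x.1, x.2 + 1) = pvShift x (0, 1) by simp [pvShift]]; exact hm)
    · cases h

lemma pv_shift_symm (a : Int × Int) (d : Int × Int) (hd : d ∈ pvDeltas) :
    ∃ d' ∈ pvDeltas, pvShift (pvShift a d) d' = a := by
  simp only [pvDeltas, List.mem_cons, List.mem_singleton] at hd
  rcases hd with rfl | rfl | rfl | rfl | h
  · exact ⟨(1, 0), by simp [pvDeltas], by simp [pvShift]⟩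
  · exact ⟨(-1, 0), by simp [pvDeltas], by simp [pvShift]⟩
  · exact ⟨(0, 1), by simp [pvDeltas], by simp [pvShift]⟩
  · exact ⟨(0, -1), by simp [pvDeltas], by simp [pvShift]⟩
  · cases h

lemma pv_iter_invariant (board : List (List Int)) (player : Int) (p0 : Int × Int) (rest : List (Int × Int))
    (h : pvPositions board player = p0 :: rest) (k : Nat) :
    ((pvGrow (pvPositions board player))^[k] (PySem.Set.ofList [p0])).Nodup ∧
    (∀ x ∈ (pvGrow (pvPositions board player))^[k] (PySem.Set.ofList [p0]), x ∈ pvPositions board player) ∧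
    (∀ x ∈ (pvGrow (pvPositions board player))^[k] (PySem.Set.ofList [p0]),
      pvReach board board.length player p0 x) := by
  induction k with
  | zero =>
    refine ⟨by simp [PySem.Set.ofList], ?_, ?_⟩
    · intro x hx
      simp only [Function.iterate_zero, id_eq, PySem.Set.mem_ofList, List.mem_singleton] at hx
      subst hx
      rw [h]; exact List.mem_cons_self
    · intro x hx
      simp only [Function.iterate_zero, id_eq, PySem.Set.mem_ofList, List.mem_singleton] at hx
      subst hx
      exact Relation.ReflTransGen.refl
  | succ k ih =>
    obtain ⟨ihnd, ihsub, ihreach⟩ := ih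
    rw [Function.iterate_succ_apply']
    refine ⟨PySem.Set.nodup_union _ _ ihnd, ?_, ?_⟩
    · intro x hx
      rcases (pv_mem_grow _ _ _).mp hx with hx | ⟨hx, -⟩
      · exact ihsub x hx
      · exact hx
    · intro x hx
      rcases (pv_mem_grow _ _ _).mp hx with hx | ⟨hxp, htest⟩
      · exact ihreach x hx
      · obtain ⟨d, hd, hq⟩ := (pv_nbrTest_iff _ _).mp htest
        obtain ⟨d', hd', hshift⟩ := pv_shift_symm x d hd
        exact Relation.ReflTransGen.tail (ihreach _ hq)
          ⟨(pv_mem_positions board player x).mp hxp, d', hd', hshift.symm⟩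

lemma pv_iter_fix (board : List (List Int)) (player : Int) (p0 : Int × Int) (rest : List (Int × Int))
    (h : pvPositions board player = p0 :: rest) :
    pvGrow (pvPositions board player)
        ((pvGrow (pvPositions board player))^[(pvPositions board player).length] (PySem.Set.ofList [p0]))
      = (pvGrow (pvPositions board player))^[(pvPositions board player).length] (PySem.Set.ofList [p0]) := by
  have main : ∀ k : Nat,
      pvGrow (pvPositions board player) ((pvGrow (pvPositions board player))^[k] (PySem.Set.ofList [p0]))
          = (pvGrow (pvPositions board player))^[k] (PySem.Set.ofList [p0])
        ∨ ((pvGrow (pvPositions board player))^[k] (PySem.Set.ofList [p0])).length ≥ k + 1 := by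
    intro k
    induction k with
    | zero =>
      right
      simp [PySem.Set.ofList, PySem.Set.add]
    | succ k ih =>
      rcases ih with hfix | hlen
      · left
        rw [Function.iterate_succ_apply', hfix, hfix]
      · obtain ⟨t, ht⟩ := pv_grow_append (pvPositions board player)
          ((pvGrow (pvPositions board player))^[k] (PySem.Set.ofList [p0]))
        rcases t with _ | ⟨a, t⟩
        · left
          have hfix : pvGrow (pvPositions board player)
              ((pvGrow (pvPositions board player))^[k] (PySem.Set.ofList [p0]))
              = (pvGrow (pvPositions board player))^[k] (PySem.Set.ofList [p0]) := by
            rw [ht]; simp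
          rw [Function.iterate_succ_apply', hfix, hfix]
        · right
          rw [Function.iterate_succ_apply', ht, List.length_append, List.length_cons]
          omega
  rcases main (pvPositions board player).length with hfix | hlen
  · exact hfix
  · exfalso
    obtain ⟨hnd, hsub, -⟩ := pv_iter_invariant board player p0 rest h (pvPositions board player).length
    have hle := (hnd.subperm hsub).length_le
    omega

lemma pv_iter_members (board : List (List Int)) (player : Int) (p0 : Int × Int) (rest : List (Int × Int))
    (h : pvPositions board player = p0 :: rest) (x : Int × Int) :
    x ∈ (pvGrow (pvPositions board player))^[(pvPositions board player).length] (PySem.Set.ofList [p0])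
      ↔ pvReach board board.length player p0 x := by
  constructor
  · exact (pv_iter_invariant board player p0 rest h _).2.2 x
  · intro hr
    induction hr with
    | refl =>
      have hmono : ∀ k : Nat, p0 ∈ (pvGrow (pvPositions board player))^[k] (PySem.Set.ofList [p0]) := by
        intro k
        induction k with
        | zero => simp [PySem.Set.ofList, PySem.Set.add]
        | succ k ih =>
          rw [Function.iterate_succ_apply']
          exact (pv_mem_grow _ _ _).mpr (Or.inl ih)
      exact hmono _
    | tail hab hrel ih =>
      obtain ⟨hok, d, hd, hbeq⟩ := hrel
      refine (pv_iter_fix board player p0 rest h) ▸ (pv_mem_grow _ _ _).mpr (Or.inr ⟨?_, ?_⟩)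
      · exact (pv_mem_positions board player _).mpr hok
      · subst hbeq
        obtain ⟨d', hd', hshift⟩ := pv_shift_symm _ d hd
        exact (pv_nbrTest_iff _ _).mpr ⟨d', hd', hshift ▸ ih⟩

lemma pv_try_eq (board : List (List Int)) (player : Int) :
    pvTryA board player = pvTryB board player := by
  cases hps : pvPositions board player with
  | nil =>
    unfold pvTryA pvTryB
    rw [hps]
  | cons p0 rest =>
    have hV := pvBfs_full board board.length player p0
    have hF := pv_iter_members board player p0 rest hps
    have hFnd := (pv_iter_invariant board player p0 rest hps (pvPositions board player).length).1
    have hperm : (pvBfs board board.length player [p0] [p0]).Perm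
        ((pvGrow (pvPositions board player))^[(pvPositions board player).length]
          (PySem.Set.ofList [p0])) :=
      (List.perm_ext_iff_of_nodup hV.1 hFnd).mpr (fun a => (hV.2 a).trans (hF a).symm)
    have hlen := hperm.length_eq
    unfold pvTryA pvTryB
    rw [hps]
    dsimp only
    rw [pv_foldl_iterate]
    rw [hps] at hlen
    have hcond : ((pvBfs board board.length player [p0] [p0]).length = (p0 :: rest).length) ↔
        (PySem.Set.len ((pvGrow (p0 :: rest))^[(p0 :: rest).length] (PySem.Set.ofList [p0]))
          = ((p0 :: rest).length : Int)) := by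
      rw [PySem.Set.len, hlen]
      exact Int.natCast_inj.symm
    rw [if_congr hcond rfl rfl]

-- ===== VERDICT (by name: the statement is the Claim_ definition above) =====
theorem check_congress_victory_py_spec : Claim_equal_check_congress_victory_py := by
  intro board _hdom _hpre
  unfold Spec_check_congress_victory_py check_congress_victory_py check_congress_victory_py_alt
  rw [pv_try_eq board 1, pv_try_eq board 2]
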